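-- pv_equiv track=rewrite | github.com/pgmesa-storage/chess_app | chessModule.py | tripleRepetition
-- ===== SOURCE A (Python) =====
-- def tripleRepetition(gameStates):
--     numMoves = len(gameStates)
--     if numMoves >= 5:
--         unique = []
--         repeted1 = []
--         repeted2 = []
--         for board in gameStates:
--             if board not in unique:
--                 unique.append(board)
--             elif board not in repeted1:
--                 repeted1.append(board)
--             else:
--                 return True
--     return False
-- ===== SOURCE B (Python) =====
-- def tripleRepetition(gameStates):
--     return len(gameStates) >= 5 and any(gameStates.count(board) >= 3 for board in gameStates)
-- ===== Notes on version B (the rewrite author's own statement) =====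
-- stated objective: simpler
-- what changed: Replaces A's one-pass loop with two tiered membership accumulator lists by a direct multiplicity test: True iff some state occurs at least three times (still plain == scans, no hashing).
import Mathlib
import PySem

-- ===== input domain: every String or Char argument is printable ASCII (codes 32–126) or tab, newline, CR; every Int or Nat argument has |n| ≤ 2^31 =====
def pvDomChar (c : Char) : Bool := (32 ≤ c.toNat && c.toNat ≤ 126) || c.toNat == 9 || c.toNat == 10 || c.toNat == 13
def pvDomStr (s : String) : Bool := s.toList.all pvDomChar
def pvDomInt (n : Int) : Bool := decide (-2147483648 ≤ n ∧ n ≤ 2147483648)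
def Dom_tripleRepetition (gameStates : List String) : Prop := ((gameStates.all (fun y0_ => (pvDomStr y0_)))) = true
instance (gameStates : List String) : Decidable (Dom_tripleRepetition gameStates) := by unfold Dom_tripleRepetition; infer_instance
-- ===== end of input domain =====

-- B replaces A's one-pass loop with tiered accumulator lists by a direct
-- multiplicity test (some state occurs ≥ 3 times); simpler, same O(n^2) cost.


-- ===== PORT A =====
-- the for-loop of A: state is (unique, repeted1); returning True == result true
def tripleRepetitionLoop : List String → List String → List String → Bool
  | [], _, _ => false
  | board :: rest, unique, repeted1 =>
    if board ∉ unique then tripleRepetitionLoop rest (unique ++ [board]) repeted1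
    else if board ∉ repeted1 then tripleRepetitionLoop rest unique (repeted1 ++ [board])
    else true

def tripleRepetition (gameStates : List String) : Bool :=
  let numMoves := gameStates.length
  if numMoves ≥ 5 then tripleRepetitionLoop gameStates [] []
  else false

-- ===== PORT B =====
def tripleRepetition_alt (gameStates : List String) : Bool :=
  decide (gameStates.length ≥ 5) &&
    gameStates.any (fun board => decide (gameStates.count board ≥ 3))

-- ===== PRECONDITION & SPEC =====
def Spec_tripleRepetition (gameStates : List String) (out : Bool) : Prop := out = tripleRepetition_alt gameStates
instance (gameStates : List String) (out : Bool) : Decidable (Spec_tripleRepetition gameStates out) := by unfold Spec_tripleRepetition; infer_instance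

-- ===== CLAIM (what is proved, stated in full; the proofs are below) =====
def Claim_equal_tripleRepetition : Prop := ∀ (gameStates : List String), Dom_tripleRepetition gameStates → Spec_tripleRepetition gameStates (tripleRepetition gameStates)

-- ===== LEMMAS AND PROOFS =====

-- Loop invariant: if `unique` holds exactly the elements seen at least once in `seen`,
-- `repeted1` those seen at least twice, and nothing in `seen` occurs three times,
-- then the loop returns true iff some element occurs >= 3 times in seen ++ rest.
theorem pv_count_one (b board : String) : List.count b [board] = if b = board then 1 else 0 := by
  by_cases hb : b = board
  · simp [hb]
  · simp [List.count_eq_zero, hb]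

theorem tripleRepetitionLoop_char (rest : List String) :
    ∀ (seen unique repeted1 : List String),
    (∀ b, b ∈ unique ↔ 1 ≤ seen.count b) →
    (∀ b, b ∈ repeted1 ↔ 2 ≤ seen.count b) →
    (∀ b, seen.count b ≤ 2) →
    (tripleRepetitionLoop rest unique repeted1 = true ↔ ∃ b, 3 ≤ (seen ++ rest).count b) := by
  induction rest with
  | nil =>
    intro seen unique repeted1 _ _ hbound
    simp only [tripleRepetitionLoop, List.append_nil]
    constructor
    · intro h; exact absurd h (by simp)
    · rintro ⟨b, hb⟩; exact absurd hb (by have := hbound b; omega)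
  | cons board rest ih =>
    intro seen unique repeted1 hu hr hbound
    have hcnt : ∀ b, List.count b (seen ++ [board] ++ rest) = List.count b (seen ++ board :: rest) := by
      intro b
      simp only [List.count_append, List.count_cons, List.count_nil]
      omega
    by_cases hbu : board ∈ unique
    · by_cases hbr : board ∈ repeted1
      · -- third occurrence: loop returns true, and count reaches 3
        have h2 : 2 ≤ seen.count board := (hr board).mp hbr
        have step : tripleRepetitionLoop (board :: rest) unique repeted1 = true := by
          simp [tripleRepetitionLoop, hbu, hbr]
        rw [step]
        simp only [true_iff]
        refine ⟨board, ?_⟩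
        rw [List.count_append]
        have : 1 ≤ List.count board (board :: rest) := by
          rw [List.count_cons_self]; omega
        omega
      · -- second occurrence
        have h1 : 1 ≤ seen.count board := (hu board).mp hbu
        have h2 : ¬ 2 ≤ seen.count board := fun h => hbr ((hr board).mpr h)
        have step : tripleRepetitionLoop (board :: rest) unique repeted1
            = tripleRepetitionLoop rest unique (repeted1 ++ [board]) := by
          simp [tripleRepetitionLoop, hbu, hbr]
        rw [step]
        have key := ih (seen ++ [board]) unique (repeted1 ++ [board])
          (by intro b
              rw [hu b, List.count_append, pv_count_one]
              split_ifs with hb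
              · subst hb; constructor <;> intro <;> omega
              · simp)
          (by intro b
              simp only [List.mem_append, List.mem_singleton, hr b,
                List.count_append, pv_count_one]
              split_ifs with hb
              · subst hb
                simp only [or_true, true_iff]
                omega
              · simp [hb])
          (by intro b
              rw [List.count_append, pv_count_one]
              have := hbound b
              split_ifs with hb
              · subst hb; omega
              · omega)
        rw [key]
        exact exists_congr fun b => by rw [hcnt b]
    · -- first occurrence
      have h0 : ¬ 1 ≤ seen.count board := fun h => hbu ((hu board).mpr h)
      have step : tripleRepetitionLoop (board :: rest) unique repeted1
          = tripleRepetitionLoop rest (unique ++ [board]) repeted1 := by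
        simp [tripleRepetitionLoop, hbu]
      rw [step]
      have key := ih (seen ++ [board]) (unique ++ [board]) repeted1
        (by intro b
            simp only [List.mem_append, List.mem_singleton, hu b,
              List.count_append, pv_count_one]
            split_ifs with hb
            · subst hb; simp
            · simp [hb])
        (by intro b
            rw [hr b, List.count_append, pv_count_one]
            split_ifs with hb
            · subst hb; constructor <;> intro <;> omega
            · simp)
        (by intro b
            rw [List.count_append, pv_count_one]
            have := hbound b
            split_ifs with hb
            · subst hb; omega
            · omega)
      rw [key]
      exact exists_congr fun b => by rw [hcnt b]

theorem loop_eq_any (gs : List String) :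
    tripleRepetitionLoop gs [] [] = gs.any (fun board => decide (gs.count board ≥ 3)) := by
  have h := tripleRepetitionLoop_char gs [] [] [] (by simp) (by simp) (by simp)
  simp only [List.nil_append] at h
  have hany : (gs.any (fun board => decide (gs.count board ≥ 3)) = true) ↔ ∃ b, 3 ≤ List.count b gs := by
    rw [List.any_eq_true]
    constructor
    · rintro ⟨b, _, hb⟩; exact ⟨b, by simpa using hb⟩
    · rintro ⟨b, hb⟩
      exact ⟨b, List.count_pos_iff.mp (by omega), by simpa using hb⟩
  cases hv : gs.any (fun board => decide (gs.count board ≥ 3)) with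
  | false =>
    rcases Bool.eq_false_or_eq_true (tripleRepetitionLoop gs [] []) with h1 | h0
    · exact absurd (hany.mpr (h.mp h1)) (by simp [hv])
    · exact h0
  | true => exact h.mpr (hany.mp hv)

-- ===== VERDICT (by name: the statement is the Claim_ definition above) =====
theorem tripleRepetition_spec : Claim_equal_tripleRepetition := by
  intro gs _
  unfold Spec_tripleRepetition tripleRepetition tripleRepetition_alt
  by_cases h5 : gs.length ≥ 5
  · simp [h5, loop_eq_any gs]
  · simp [h5]
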